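-- pv_equiv track=rewrite | github.com/defenfiver/Algorithms | Assignment 7/7-2/main.py | f
-- ===== SOURCE A (Python) =====
-- def f(arr, N, limit):
--     arr.sort()
--     total = 0
--     while True:
--         if arr[0]+total > limit:  # if nothing is able to added to the total
--             break
--         for x in range(len(arr)-1, -1, -1):  # starts at the largest number
--             if arr[x]+total <= limit:
--                 total += arr[x]
--                 break
--             else:
--                 arr.pop(x)
--     tmp = limit // arr[0]
--     if tmp * arr[0] > total:
--         total = tmp * arr[0]
--     return total
-- ===== SOURCE B (Python) =====
-- def f(arr, N, limit):
--     rem = limit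
--     for v in sorted(arr, reverse=True):
--         if 0 < v <= rem:
--             rem %= v
--     m = min(arr)
--     cap = (limit // m) * m
--     return max(limit - rem, cap)
-- ===== Notes on version B (the rewrite author's own statement) =====
-- stated objective: faster
-- what changed: A repeatedly re-scans the sorted list adding one element per pass of a while-loop (and pops non-fitting tails); B does a single descending pass taking each value v in bulk via rem %= v, then applies the same (limit//min)*min floor. Intended as faster (per-value O(1) vs limit/v additions); a timing run saw A time out at n=16 where B returned but could not measure a clean ratio.
import Mathlib
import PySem

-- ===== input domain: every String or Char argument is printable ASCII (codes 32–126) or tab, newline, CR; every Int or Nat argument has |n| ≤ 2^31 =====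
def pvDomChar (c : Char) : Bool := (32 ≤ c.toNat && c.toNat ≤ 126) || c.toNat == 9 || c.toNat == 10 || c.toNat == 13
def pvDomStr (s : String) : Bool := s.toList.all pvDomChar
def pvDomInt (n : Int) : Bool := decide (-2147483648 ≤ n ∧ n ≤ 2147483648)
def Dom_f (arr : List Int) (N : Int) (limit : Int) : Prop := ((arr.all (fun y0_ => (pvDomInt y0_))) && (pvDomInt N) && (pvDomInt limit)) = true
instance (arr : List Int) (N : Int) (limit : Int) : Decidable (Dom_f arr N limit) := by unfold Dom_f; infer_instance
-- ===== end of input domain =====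

-- B replaces A's one-unit-at-a-time greedy while-loop by a single descending pass taking each value
-- in one arithmetic step (rem % v); intended as faster (measured: A timed out at n=16 where B returned,
-- no clean ratio obtainable). Equivalence is about the RETURN value only: A sorts arr in place, B does not mutate it.

-- ===== PORT A =====
-- inner 'for x in range(len(arr)-1, -1, -1)' loop of A; x counts down; 'arr.pop(x)' always fires at
-- x = len(arr)-1 (x tracks the last index while popping), i.e. it drops the last element: arr.take x'.
-- Returns some (arr, total) when the loop breaks, none when it falls through (everything popped).
def fInner (arr : List Int) (x : Nat) (total : Int) (limit : Int) : Option (List Int × Int) :=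
  match x with
  | 0 => none
  | x' + 1 =>
    let v := PySem.List.pyGetD arr (x' : Int) 0
    if v + total ≤ limit then some (arr, total + v)
    else fInner (arr.take x') x' total limit

-- the 'while True' loop of A, fuel-bounded (under Pre_f each pass adds ≥ 1 to total ≤ limit, so
-- limit.toNat + 2 fuel suffices; arr[0] on an empty list only happens outside Pre_f, default 0).
def fLoop (fuel : Nat) (arr : List Int) (total : Int) (limit : Int) : List Int × Int :=
  match fuel with
  | 0 => (arr, total)
  | fuel + 1 =>
    if PySem.List.pyGetD arr 0 0 + total > limit then (arr, total)
    else
      match fInner arr arr.length total limit with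
      | some (arr', total') => fLoop fuel arr' total' limit
      | none => fLoop fuel [] total limit

def f (arr : List Int) (N : Int) (limit : Int) : Int :=
  let s := PySem.List.sorted arr (fun v => v) false
  let r := fLoop (limit.toNat + 2) s 0 limit
  let total := r.2
  let a0 := PySem.List.pyGetD r.1 0 1      -- arr[0]; nonempty under Pre_f
  let tmp := PySem.Int.floordiv limit a0
  if tmp * a0 > total then tmp * a0 else total

-- ===== PORT B =====
-- body of B's 'for v in sorted(arr, reverse=True)' loop
def gstep (rem : Int) (v : Int) : Int :=
  if 0 < v ∧ v ≤ rem then PySem.Int.mod rem v else rem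

def f_alt (arr : List Int) (N : Int) (limit : Int) : Int :=
  let rem := (PySem.List.sorted arr (fun v => v) true).foldl gstep limit
  let m := (PySem.List.min? arr (fun v => v)).getD 1   -- min(arr); nonempty under Pre_f
  let cap := PySem.Int.floordiv limit m * m
  max (limit - rem) cap

-- ===== PRECONDITION & SPEC =====
-- Pre_f is exactly where the Python A returns: with a nonpositive element whose minimum is ≤ limit the
-- while-loop never terminates, with min(arr) = 0 > limit it raises ZeroDivisionError, and on [] IndexError.
def Pre_f (arr : List Int) (N : Int) (limit : Int) : Prop :=
  arr ≠ [] ∧ ((∀ v ∈ arr, 0 < v) ∨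
    ((∀ v ∈ arr, limit < v) ∧ PySem.List.min? arr (fun v => v) ≠ some 0))
instance (arr : List Int) (N : Int) (limit : Int) : Decidable (Pre_f arr N limit) := by
  unfold Pre_f; infer_instance

def pvWitness_f : List Int × Int × Int := ([3, 8], 0, 10)

def Spec_f (arr : List Int) (N : Int) (limit : Int) (out : Int) : Prop := out = f_alt arr N limit
instance (arr : List Int) (N : Int) (limit : Int) (out : Int) : Decidable (Spec_f arr N limit out) := by unfold Spec_f; infer_instance

-- ===== CLAIM (what is proved, stated in full; the proofs are below) =====
def Claim_equal_f : Prop := ∀ (arr : List Int) (N : Int) (limit : Int), Dom_f arr N limit → Pre_f arr N limit → Spec_f arr N limit (f arr N limit)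

-- ===== LEMMAS AND PROOFS =====

-- Python '%' agrees with Lean's emod for a positive divisor.
theorem gstep_eq (r v : Int) (h : 0 < v ∧ v ≤ r) : gstep r v = r % v := by
  simp [gstep, h]

theorem gstep_noop (r v : Int) (h : ¬ (0 < v ∧ v ≤ r)) : gstep r v = r := by
  simp [gstep, h]

-- values larger than the remainder are no-ops for the whole fold
theorem foldl_gstep_noop (l : List Int) (r : Int) (h : ∀ v ∈ l, r < v) :
    l.foldl gstep r = r := by
  induction l with
  | nil => rfl
  | cons v t ih =>
    have hv : r < v := h v (by simp)
    simp only [List.foldl_cons, gstep_noop r v (by omega)]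
    exact ih (fun u hu => h u (by simp [hu]))

-- subtracting the head once does not change the fold (the mod absorbs it)
theorem foldl_gstep_sub (l : List Int) (r v : Int) (hh : l.head? = some v)
    (hv : 0 < v) (hle : v ≤ r) : l.foldl gstep r = l.foldl gstep (r - v) := by
  cases l with
  | nil => simp at hh
  | cons w t =>
    have hwv : w = v := by simpa using hh
    rw [hwv]
    simp only [List.foldl_cons]
    rw [gstep_eq r v ⟨hv, hle⟩]
    by_cases h2 : v ≤ r - v
    · rw [gstep_eq (r - v) v ⟨hv, h2⟩, Int.sub_emod_right]
    · rw [gstep_noop (r - v) v (by omega)]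
      have : r % v = r - v := by
        have := Int.sub_emod_right r v
        rw [← this, Int.emod_eq_of_lt (by omega) (by omega)]
      rw [this]

theorem inner_spec : ∀ (p : List Int) (total limit : Int),
    (∀ v ∈ p, 0 < v) → p.Pairwise (· ≤ ·) → p ≠ [] →
    PySem.List.pyGetD p 0 0 + total ≤ limit →
    ∃ q v, fInner p p.length total limit = some (q, total + v) ∧
      q ≠ [] ∧ q.head? = p.head? ∧ q.Pairwise (· ≤ ·) ∧ (∀ u ∈ q, 0 < u) ∧
      q.reverse.head? = some v ∧ v + total ≤ limit ∧ 0 < v ∧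
      p.reverse.foldl gstep (limit - total) = q.reverse.foldl gstep (limit - total) := by
  intro p
  induction p using List.reverseRecOn with
  | nil => intro total limit _ _ hne _; exact absurd rfl hne
  | append_singleton init v ih =>
    intro total limit hpos hsorted _ hhead
    have hget : PySem.List.pyGetD (init ++ [v]) ((init.length : Nat) : Int) 0 = v := by
      rw [PySem.List.pyGetD_natCast]
      simp [List.getD]
    have hlen : (init ++ [v]).length = init.length + 1 := by simp
    by_cases hfit : v + total ≤ limit
    · refine ⟨init ++ [v], v, ?_, by simp, rfl, hsorted, hpos, by simp, hfit,
        hpos v (by simp), rfl⟩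
      rw [hlen]
      simp only [fInner, hget, if_pos hfit]
    · have hinit_ne : init ≠ [] := by
        rintro rfl
        simp [PySem.List.pyGetD_zero, List.getD] at hhead
        omega
      obtain ⟨a, t, rfl⟩ := List.exists_cons_of_ne_nil hinit_ne
      have hstep : fInner ((a :: t) ++ [v]) ((a :: t).length + 1) total limit
          = fInner (a :: t) (a :: t).length total limit := by
        simp only [fInner, hget, if_neg hfit]
        congr 1
        exact List.take_left
      have hpos' : ∀ u ∈ (a :: t), 0 < u := fun u hu => hpos u (List.mem_append_left [v] hu)
      have hsorted' : (a :: t).Pairwise (· ≤ ·) :=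
        (List.pairwise_append.mp hsorted).1
      have hhead' : PySem.List.pyGetD (a :: t) 0 0 + total ≤ limit := by
        simpa [PySem.List.pyGetD_zero, List.getD] using hhead
      obtain ⟨q, w, heq, hne', hh', hsort', hpos'', hrevh, hwfit, hwpos, hfold⟩ :=
        ih total limit hpos' hsorted' (by simp) hhead'
      refine ⟨q, w, ?_, hne', by simpa using hh', hsort', hpos'', hrevh, hwfit, hwpos, ?_⟩
      · rw [hlen, hstep, heq]
      · have : ((a :: t) ++ [v]).reverse.foldl gstep (limit - total)
            = (a :: t).reverse.foldl gstep (gstep (limit - total) v) := by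
          simp
        rw [this, gstep_noop (limit - total) v (by omega), hfold]

theorem loop_spec : ∀ (fuel : Nat) (p : List Int) (total limit : Int),
    (∀ v ∈ p, 0 < v) → p.Pairwise (· ≤ ·) → p ≠ [] → (limit - total).toNat < fuel →
    ∃ q, fLoop fuel p total limit = (q, limit - p.reverse.foldl gstep (limit - total)) ∧
      q ≠ [] ∧ q.head? = p.head? := by
  intro fuel
  induction fuel with
  | zero => intro p total limit _ _ _ hf; omega
  | succ fuel ih =>
    intro p total limit hpos hsorted hne hf
    obtain ⟨a, t, rfl⟩ := List.exists_cons_of_ne_nil hne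
    have hget0 : PySem.List.pyGetD (a :: t) 0 0 = a := by
      simp [PySem.List.pyGetD_zero, List.getD]
    by_cases hbr : PySem.List.pyGetD (a :: t) 0 0 + total > limit
    · have hnoop : (a :: t).reverse.foldl gstep (limit - total) = limit - total := by
        apply foldl_gstep_noop
        intro v hv
        have hv' : v ∈ a :: t := (List.mem_reverse).mp hv
        have hav : a ≤ v := by
          rcases List.mem_cons.mp hv' with h | hvt
          · omega
          · exact (List.pairwise_cons.mp hsorted).1 v hvt
        rw [hget0] at hbr
        omega
      refine ⟨a :: t, ?_, by simp, rfl⟩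
      simp only [fLoop, if_pos hbr, hnoop]
      have : limit - (limit - total) = total := by ring
      rw [this]
    · obtain ⟨q0, v, heq, hne0, hh0, hsort0, hpos0, hrevh, hvfit, hvpos, hfold⟩ :=
        inner_spec (a :: t) total limit hpos hsorted (by simp) (by omega)
      have hmeas : (limit - (total + v)).toNat < fuel := by omega
      obtain ⟨q, hq, hqne, hqh⟩ := ih q0 (total + v) limit hpos0 hsort0 hne0 hmeas
      refine ⟨q, ?_, hqne, hqh.trans hh0⟩
      have hstep : fLoop (fuel + 1) (a :: t) total limit = fLoop fuel q0 (total + v) limit := by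
        simp only [fLoop, if_neg hbr, heq]
      rw [hstep, hq]
      have h1 : q0.reverse.foldl gstep (limit - total) = q0.reverse.foldl gstep (limit - total - v) :=
        foldl_gstep_sub _ _ v hrevh hvpos (by omega)
      have h2 : limit - (total + v) = limit - total - v := by ring
      rw [hfold, h1, h2]

-- min(arr) is the head of sorted(arr)
theorem min?_eq_head_sorted (arr : List Int) :
    PySem.List.min? arr (fun v => v) = (PySem.List.sorted arr (fun v => v) false).head? := by
  cases hsrt : PySem.List.sorted arr (fun v => v) false with
  | nil =>
    have harr : arr = [] := (PySem.List.sorted_eq_nil_iff arr (fun v => v) false).mp hsrt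
    subst harr
    simp [PySem.List.min?_eq_none_iff]
  | cons m t =>
    have harr_ne : arr ≠ [] := by
      intro h0
      rw [h0] at hsrt
      simp [PySem.List.sorted] at hsrt
    have hmin_le : ∀ y ∈ arr, m ≤ y := PySem.List.key_head_sorted_le arr (fun v => v) hsrt
    have hm_mem : m ∈ arr := by
      have : m ∈ PySem.List.sorted arr (fun v => v) false := by rw [hsrt]; simp
      exact (PySem.List.mem_sorted arr (fun v => v) false m).mp this
    cases hmin : PySem.List.min? arr (fun v => v) with
    | none => exact absurd ((PySem.List.min?_eq_none_iff arr (fun v => v)).mp hmin) harr_ne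
    | some m' =>
      have h1 : m' ∈ arr := PySem.List.min?_mem hmin
      have h2 : ∀ y ∈ arr, m' ≤ y := PySem.List.min?_isMin hmin
      have : m' = m := le_antisymm (h2 m hm_mem) (hmin_le m' h1)
      simp [this]

-- sorted(arr, reverse=True) = reverse of sorted(arr) for Int lists
theorem sorted_rev_eq_reverse (arr : List Int) :
    PySem.List.sorted arr (fun v => v) true = (PySem.List.sorted arr (fun v => v) false).reverse := by
  have hperm : (PySem.List.sorted arr (fun v => v) true).Perm
      ((PySem.List.sorted arr (fun v => v) false).reverse) :=
    (PySem.List.sorted_perm arr (fun v => v) true).trans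
      ((PySem.List.sorted_perm arr (fun v => v) false).symm.trans (List.reverse_perm _).symm)
  have hs1 : List.Pairwise (fun a b : Int => b ≤ a) (PySem.List.sorted arr (fun v => v) true) :=
    PySem.List.sorted_pairwise_rev arr (fun v => v)
  have hs2 : List.Pairwise (fun a b : Int => b ≤ a)
      ((PySem.List.sorted arr (fun v => v) false).reverse) :=
    (List.pairwise_reverse).mpr (PySem.List.sorted_pairwise arr (fun v => v))
  exact @List.Perm.eq_of_pairwise' Int (fun a b => b ≤ a)
    ⟨fun a b hab hba => le_antisymm hba hab⟩ _ _ hs1 hs2 hperm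

-- ===== VERDICT (by name: the statement is the Claim_ definition above) =====
theorem f_spec : Claim_equal_f := by
  intro arr N limit _ hPre
  obtain ⟨hne, hcase⟩ := hPre
  simp only [Spec_f, f, f_alt]
  rw [sorted_rev_eq_reverse arr, min?_eq_head_sorted arr]
  have hsne : PySem.List.sorted arr (fun v => v) false ≠ [] := by
    intro h0; exact hne ((PySem.List.sorted_eq_nil_iff arr (fun v => v) false).mp h0)
  have hsort : (PySem.List.sorted arr (fun v => v) false).Pairwise (· ≤ ·) :=
    PySem.List.sorted_pairwise arr (fun v => v)
  have hmem : ∀ v, v ∈ PySem.List.sorted arr (fun v => v) false ↔ v ∈ arr :=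
    fun v => PySem.List.mem_sorted arr (fun u => u) false v
  rcases hcase with hposAll | hbig
  · have hpos : ∀ v ∈ PySem.List.sorted arr (fun v => v) false, 0 < v :=
      fun v hv => hposAll v ((hmem v).mp hv)
    obtain ⟨q, hq, hqne, hqh⟩ :=
      loop_spec (limit.toNat + 2) (PySem.List.sorted arr (fun v => v) false) 0 limit
        hpos hsort hsne (by omega)
    rw [hq]
    have ha0 : PySem.List.pyGetD q 0 1 =
        ((PySem.List.sorted arr (fun v => v) false).head?).getD 1 := by
      rw [PySem.List.pyGetD_zero, ← hqh]
      cases q with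
      | nil => exact absurd rfl hqne
      | cons b u => simp [List.getD]
    rw [ha0]
    have hz : limit - (0 : Int) = limit := by ring
    rw [hz]
    split_ifs with h1 <;> omega
  · have hgt : ∀ v ∈ PySem.List.sorted arr (fun v => v) false, limit < v :=
      fun v hv => hbig.1 v ((hmem v).mp hv)
    obtain ⟨h0, t0, hst⟩ := List.exists_cons_of_ne_nil hsne
    have hh0mem : h0 ∈ PySem.List.sorted arr (fun v => v) false := by rw [hst]; simp
    have hloop : fLoop (limit.toNat + 2) (PySem.List.sorted arr (fun v => v) false) 0 limit
        = (PySem.List.sorted arr (fun v => v) false, 0) := by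
      show fLoop (limit.toNat + 1 + 1) (PySem.List.sorted arr (fun v => v) false) 0 limit
        = (PySem.List.sorted arr (fun v => v) false, 0)
      simp only [fLoop]
      rw [if_pos]
      rw [hst, PySem.List.pyGetD_zero]
      have := hgt h0 hh0mem
      simp [List.getD]
      omega
    rw [hloop]
    have hrem : (PySem.List.sorted arr (fun v => v) false).reverse.foldl gstep limit = limit :=
      foldl_gstep_noop _ _ (fun v hv => hgt v (by simpa using hv))
    rw [hrem]
    have ha0 : PySem.List.pyGetD (PySem.List.sorted arr (fun v => v) false) 0 1 =
        ((PySem.List.sorted arr (fun v => v) false).head?).getD 1 := by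
      rw [PySem.List.pyGetD_zero]
      rw [hst]
      simp [List.getD]
    rw [ha0]
    split_ifs with h1 <;> omega
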